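-- pv_equiv track=rewrite | github.com/10U-Labs/assert-no-inline-directives | src/assert_no_inline_directives/scanner.py | _get_c_comment_portion
-- ===== SOURCE A (Python) =====
-- def _skip_c_string_literal(line: str, i: int, quote: str) -> int:
--     """Skip past a C/C++ string or character literal.
--
--     Advances past the contents of a string or character literal,
--     handling backslash escape sequences.
--
--     Args:
--         line: The line of text.
--         i: Index just after the opening quote character.
--         quote: The quote character ('"' or "'").
--
--     Returns:
--         Index of the closing quote character, or end of line.
--     """
--     while i < len(line):
--         if line[i] == "\\":
--             i += 2
--             continue
--         if line[i] == quote: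
--             break
--         i += 1
--     return i
--
-- def _get_c_comment_portion(
--     line: str,
--     in_block_comment: bool,
-- ) -> tuple[str | None, bool]:
--     """Get the comment portion of a C/C++ line, tracking block comment state.
--
--     Handles // line comments, /* */ block comments, string literals, and
--     character literals.
--
--     Args:
--         line: The line of text to scan.
--         in_block_comment: Whether we are inside a /* */ block comment.
--
--     Returns:
--         Tuple of (comment_portion, new_block_comment_state).
--         comment_portion is None if the line has no comment outside strings.
--     """
--     comment_parts: list[str] = []
--     i = 0
--
--     if in_block_comment:
--         end = line.find("*/")
--         if end == -1:
--             # Entire line is inside block comment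
--             return line, True
--         comment_parts.append(line[:end])
--         i = end + 2
--         in_block_comment = False
--
--     while i < len(line):
--         two = line[i:i + 2]
--
--         if two == "//":
--             comment_parts.append(line[i:])
--             break
--
--         if two == "/*":
--             end = line.find("*/", i + 2)
--             if end == -1:
--                 # Block comment continues to next line
--                 comment_parts.append(line[i:])
--                 return " ".join(comment_parts), True
--             comment_parts.append(line[i:end + 2])
--             i = end + 2
--             continue
--
--         if line[i] in ('"', "'"):
--             i = _skip_c_string_literal(line, i + 1, line[i])
--
--         i += 1
--
--     if comment_parts:
--         return " ".join(comment_parts), in_block_comment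
--     return None, in_block_comment
-- ===== SOURCE B (Python) =====
-- def _get_c_comment_portion(line, in_block_comment):
--     """Single left-to-right scan with an explicit state machine (no str.find,
--     no helper): states are 'normal', 'string' (inside a string/char literal)
--     and 'block' (inside a /* */ comment)."""
--     parts = []
--     state = 'block' if in_block_comment else 'normal'
--     opened_here = False  # did the current block comment open on this line?
--     start = 0            # index where the current block-comment fragment starts
--     quote = ''
--     i = 0
--     n = len(line)
--     while i < n:
--         c = line[i]
--         if state == 'normal':
--             nxt = line[i + 1] if i + 1 < n else ''
--             if c == '/' and nxt == '/':
--                 parts.append(line[i:])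
--                 return ' '.join(parts), False
--             if c == '/' and nxt == '*':
--                 state = 'block'
--                 opened_here = True
--                 start = i
--                 i += 2
--             elif c == '"' or c == "'":
--                 state = 'string'
--                 quote = c
--                 i += 1
--             else:
--                 i += 1
--         elif state == 'string':
--             if c == '\\':
--                 i += 2
--             else:
--                 if c == quote:
--                     state = 'normal'
--                 i += 1
--         else:  # state == 'block'
--             if c == '*' and i + 1 < n and line[i + 1] == '/':
--                 parts.append(line[start:i + 2] if opened_here else line[start:i])
--                 state = 'normal'
--                 i += 2
--             else:
--                 i += 1
--     if state == 'block':
--         parts.append(line[start:])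
--         return ' '.join(parts), True
--     return (' '.join(parts) if parts else None), False
-- ===== Notes on version B (the rewrite author's own statement) =====
-- stated objective: alternative
-- what changed: Replaces A's structure (a separate string-skipping helper, str.find calls for '*/' and a pre-loop special case for the carried-over block comment) with one uniform left-to-right character loop driven by an explicit state variable (normal / string / block) that accumulates comment fragments inline.
import Mathlib
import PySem

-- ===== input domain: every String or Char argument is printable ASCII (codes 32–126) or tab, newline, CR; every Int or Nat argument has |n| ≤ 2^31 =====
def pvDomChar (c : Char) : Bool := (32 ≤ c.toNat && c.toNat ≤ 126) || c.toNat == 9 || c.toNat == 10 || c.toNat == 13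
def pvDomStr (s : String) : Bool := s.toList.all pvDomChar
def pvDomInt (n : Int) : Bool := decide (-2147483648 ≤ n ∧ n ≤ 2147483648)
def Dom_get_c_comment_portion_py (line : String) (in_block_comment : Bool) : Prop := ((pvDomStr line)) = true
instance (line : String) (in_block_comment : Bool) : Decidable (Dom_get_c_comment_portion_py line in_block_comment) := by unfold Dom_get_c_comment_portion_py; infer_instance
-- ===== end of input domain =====

-- B replaces A's decomposition (string-skipping helper + str.find for '*/' + a pre-loop
-- special case for a carried-over block comment) by ONE uniform character-at-a-time loop
-- with an explicit state variable; same O(n) cost, alternative structure.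

-- ===== PORT A =====

-- port of _skip_c_string_literal.  The while-loop is structural recursion on a fuel
-- counter: every iteration advances i by at least 1, so fuel = len(line) (passed by the
-- caller) never runs out before the Python loop condition i < len(line) turns false.
def pvSkipA (l : List Char) (fuel : Nat) (i : Nat) (quote : Char) : Nat :=
  match fuel with
  | 0 => i
  | fuel + 1 =>
    if i < l.length then
      if l.getD i ' ' = '\\' then pvSkipA l fuel (i + 2) quote
      else if l.getD i ' ' = quote then i
      else pvSkipA l fuel (i + 1) quote
    else i

-- the while-loop of _get_c_comment_portion (entered with in_block_comment already False;
-- 'two == "//"' / 'two == "/*"' are rendered as the equivalent position-wise tests; same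
-- fuel scheme: every iteration advances i by at least 1, fuel = len(line) suffices)
def pvMainA (l : List Char) (fuel : Nat) (i : Nat) (parts : List String) : Option String × Bool :=
  match fuel with
  | 0 => ((if parts.isEmpty then none else some (PySem.Str.join " " parts)), false)
  | fuel + 1 =>
    if i < l.length then
      if l.getD i ' ' = '/' ∧ i + 1 < l.length ∧ l.getD (i + 1) ' ' = '/' then
        (some (PySem.Str.join " " (parts ++ [String.ofList (PySem.List.slice l (some ↑i) none)])), false)
      else if l.getD i ' ' = '/' ∧ i + 1 < l.length ∧ l.getD (i + 1) ' ' = '*' then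
        if PySem.Chars.findFrom l ['*', '/'] (↑(i + 2)) none = -1 then
          (some (PySem.Str.join " " (parts ++ [String.ofList (PySem.List.slice l (some ↑i) none)])), true)
        else
          pvMainA l fuel ((PySem.Chars.findFrom l ['*', '/'] (↑(i + 2)) none).toNat + 2)
            (parts ++ [String.ofList (PySem.List.slice l (some ↑i)
              (some (PySem.Chars.findFrom l ['*', '/'] (↑(i + 2)) none + 2)))])
      else if l.getD i ' ' = '"' ∨ l.getD i ' ' = '\'' then
        pvMainA l fuel (pvSkipA l l.length (i + 1) (l.getD i ' ') + 1) parts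
      else
        pvMainA l fuel (i + 1) parts
    else
      ((if parts.isEmpty then none else some (PySem.Str.join " " parts)), false)

def get_c_comment_portion_py (line : String) (in_block_comment : Bool) : Option String × Bool :=
  let l := line.toList
  if in_block_comment then
    if PySem.Chars.find l ['*', '/'] = -1 then
      (some line, true)
    else
      pvMainA l l.length ((PySem.Chars.find l ['*', '/']).toNat + 2)
        [String.ofList (PySem.List.slice l none (some (PySem.Chars.find l ['*', '/'])))]
  else
    pvMainA l l.length 0 []

-- ===== PORT B =====

-- B's explicit scanner state: normal / inside a string or char literal (its quote) /
-- inside a block comment (fragment start index, whether it opened on this line)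
inductive PvStateB where
  | normal : PvStateB
  | instr : Char → PvStateB
  | inblock : Nat → Bool → PvStateB
deriving DecidableEq, Repr

-- the single while-loop of B (Source B), one step per character (fuel scheme as above:
-- every iteration advances i by 1 or 2, so fuel = len(line) suffices)
def pvLoopB (l : List Char) (fuel : Nat) (i : Nat) (st : PvStateB) (parts : List String) : Option String × Bool :=
  match fuel with
  | 0 =>
    match st with
    | .inblock start _ =>
      (some (PySem.Str.join " " (parts ++ [String.ofList (PySem.List.slice l (some ↑start) none)])), true)
    | _ => ((if parts.isEmpty then none else some (PySem.Str.join " " parts)), false)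
  | fuel + 1 =>
    if i < l.length then
      match st with
      | .normal =>
        if l.getD i ' ' = '/' ∧ i + 1 < l.length ∧ l.getD (i + 1) ' ' = '/' then
          (some (PySem.Str.join " " (parts ++ [String.ofList (PySem.List.slice l (some ↑i) none)])), false)
        else if l.getD i ' ' = '/' ∧ i + 1 < l.length ∧ l.getD (i + 1) ' ' = '*' then
          pvLoopB l fuel (i + 2) (.inblock i true) parts
        else if l.getD i ' ' = '"' ∨ l.getD i ' ' = '\'' then
          pvLoopB l fuel (i + 1) (.instr (l.getD i ' ')) parts
        else
          pvLoopB l fuel (i + 1) .normal parts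
      | .instr q =>
        if l.getD i ' ' = '\\' then pvLoopB l fuel (i + 2) (.instr q) parts
        else if l.getD i ' ' = q then pvLoopB l fuel (i + 1) .normal parts
        else pvLoopB l fuel (i + 1) (.instr q) parts
      | .inblock start opened =>
        if l.getD i ' ' = '*' ∧ i + 1 < l.length ∧ l.getD (i + 1) ' ' = '/' then
          pvLoopB l fuel (i + 2) .normal
            (parts ++ [String.ofList (PySem.List.slice l (some ↑start) (some ↑(if opened then i + 2 else i)))])
        else
          pvLoopB l fuel (i + 1) (.inblock start opened) parts
    else
      match st with
      | .inblock start _ =>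
        (some (PySem.Str.join " " (parts ++ [String.ofList (PySem.List.slice l (some ↑start) none)])), true)
      | _ => ((if parts.isEmpty then none else some (PySem.Str.join " " parts)), false)

def get_c_comment_portion_py_alt (line : String) (in_block_comment : Bool) : Option String × Bool :=
  pvLoopB line.toList line.toList.length 0 (if in_block_comment then .inblock 0 false else .normal) []

-- ===== PRECONDITION & SPEC =====
def Spec_get_c_comment_portion_py (line : String) (in_block_comment : Bool) (out : Option String × Bool) : Prop := out = get_c_comment_portion_py_alt line in_block_comment
instance (line : String) (in_block_comment : Bool) (out : Option String × Bool) : Decidable (Spec_get_c_comment_portion_py line in_block_comment out) := by unfold Spec_get_c_comment_portion_py; infer_instance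

-- ===== CLAIM (what is proved, stated in full; the proofs are below) =====
def Claim_equal_get_c_comment_portion_py : Prop := ∀ (line : String) (in_block_comment : Bool), Dom_get_c_comment_portion_py line in_block_comment → Spec_get_c_comment_portion_py line in_block_comment (get_c_comment_portion_py line in_block_comment)

-- ===== LEMMAS AND PROOFS =====

theorem pvFindFrom_gt (l sub : List Char) (k : Nat) (h : l.length < k) :
    PySem.Chars.findFrom l sub (↑k) none = -1 := by
  simp only [PySem.Chars.findFrom]
  split_ifs with h1 h2 h3 <;> first | rfl | omega

theorem pvFindFrom_ge (l sub : List Char) (k : Nat)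
    (h : PySem.Chars.findFrom l sub (↑k) none ≠ -1) :
    (k : Int) ≤ PySem.Chars.findFrom l sub (↑k) none := by
  by_cases hk : k ≤ l.length
  · exact (PySem.Chars.findFrom_natCast_spec l sub k hk h).1
  · exact absurd (pvFindFrom_gt l sub k (by omega)) h

-- does "*/" occur at position k?
def pvOcc (l : List Char) (k : Nat) : Bool :=
  decide (k + 1 < l.length) && (l.getD k ' ' == '*') && (l.getD (k + 1) ' ' == '/')

theorem pvPrefix_pair (xs : List Char) (a b : Char) :
    [a, b] <+: xs ↔ xs[0]? = some a ∧ xs[1]? = some b := by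
  match xs with
  | [] => simp
  | [x] => simp [List.cons_prefix_cons]
  | x :: y :: t => simp [List.cons_prefix_cons, eq_comm]

theorem pvOcc_iff (l : List Char) (k : Nat) :
    pvOcc l k = true ↔ ['*', '/'] <+: l.drop k := by
  rw [pvPrefix_pair]
  simp only [pvOcc, List.getElem?_drop, Bool.and_eq_true, beq_iff_eq, decide_eq_true_eq]
  constructor
  · rintro ⟨⟨h1, h2⟩, h3⟩
    rw [List.getElem?_eq_getElem (by omega), List.getElem?_eq_getElem (by omega)]
    simp only [List.getD_eq_getElem?_getD, List.getElem?_eq_getElem (show k < l.length by omega),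
      List.getElem?_eq_getElem (show k + 1 < l.length from h1), Option.getD_some] at h2 h3
    simp [h2, h3]
  · rintro ⟨h1, h2⟩
    have hk1 : k + 1 < l.length := by
      rcases List.getElem?_eq_some_iff.mp h2 with ⟨h, _⟩; omega
    refine ⟨⟨hk1, ?_⟩, ?_⟩
    · simp only [List.getD_eq_getElem?_getD, Nat.add_zero] at *
      rw [List.getElem?_eq_getElem (by omega)] at h1 ⊢
      simpa using congrArg (·.getD ' ') h1
    · simp only [List.getD_eq_getElem?_getD] at *
      rw [List.getElem?_eq_getElem hk1] at h2 ⊢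
      simpa using congrArg (·.getD ' ') h2

theorem pvOcc_false_of_end (l : List Char) (m : Nat) (h : l.length ≤ m + 1) :
    pvOcc l m = false := by
  simp only [pvOcc, Bool.and_eq_false_iff, decide_eq_false_iff_not, not_lt]
  left; left; omega

theorem pvOcc_len (l : List Char) (m : Nat) (h : pvOcc l m = true) : m + 1 < l.length := by
  simp only [pvOcc, Bool.and_eq_true, decide_eq_true_eq] at h
  exact h.1.1

theorem pvFind_none_of (l : List Char) (k : Nat) (h : ∀ m, k ≤ m → pvOcc l m = false) :
    PySem.Chars.findFrom l ['*', '/'] (↑k) none = -1 := by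
  by_cases hk : k ≤ l.length
  · rw [PySem.Chars.findFrom_natCast_eq_neg_one_iff l _ k hk]
    intro hinf
    obtain ⟨j, hj⟩ := (PySem.Chars.exists_prefix_drop_iff_isIn ['*', '/'] (l.drop k)).2
      ((PySem.Chars.isIn_iff_infix _ _).2 hinf)
    rw [List.drop_drop] at hj
    have := (pvOcc_iff l (k + j)).2 hj
    rw [h (k + j) (by omega)] at this
    exact Bool.false_ne_true this
  · exact pvFindFrom_gt l _ k (by omega)

theorem pvFind_eq_of (l : List Char) (k j : Nat) (hk : k ≤ l.length) (hkj : k ≤ j)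
    (hj : pvOcc l j = true) (hmin : ∀ m, k ≤ m → m < j → pvOcc l m = false) :
    PySem.Chars.findFrom l ['*', '/'] (↑k) none = ↑j := by
  have hinf : ['*', '/'] <:+: List.drop k l := by
    rw [← PySem.Chars.isIn_iff_infix]
    refine (PySem.Chars.exists_prefix_drop_iff_isIn _ _).1 ⟨j - k, ?_⟩
    rw [List.drop_drop]
    have hjk : k + (j - k) = j := by omega
    rw [hjk]
    exact (pvOcc_iff l j).1 hj
  have hne : PySem.Chars.findFrom l ['*', '/'] (↑k) none ≠ -1 := fun hc =>
    ((PySem.Chars.findFrom_natCast_eq_neg_one_iff l _ k hk).1 hc) hinf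
  obtain ⟨h1, h2, h3⟩ := PySem.Chars.findFrom_natCast_spec l _ k hk hne
  have hocc : pvOcc l (PySem.Chars.findFrom l ['*', '/'] (↑k) none).toNat = true :=
    (pvOcc_iff l _).2 h2
  have hkf : k ≤ (PySem.Chars.findFrom l ['*', '/'] (↑k) none).toNat := by omega
  have hj1 : ¬ (PySem.Chars.findFrom l ['*', '/'] (↑k) none).toNat < j := fun hlt => by
    rw [hmin _ hkf hlt] at hocc; exact Bool.false_ne_true hocc
  have hj2 : ¬ j < (PySem.Chars.findFrom l ['*', '/'] (↑k) none).toNat := fun hlt =>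
    h3 j hkj hlt ((pvOcc_iff l j).1 hj)
  omega

theorem pvFind_hit (l : List Char) (k : Nat) (h : pvOcc l k = true) :
    PySem.Chars.findFrom l ['*', '/'] (↑k) none = ↑k := by
  have hk : k ≤ l.length := by
    have := pvOcc_len l k h
    omega
  exact pvFind_eq_of l k k hk le_rfl h (by omega)

theorem pvFind_step (l : List Char) (k : Nat) (h : pvOcc l k = false) :
    PySem.Chars.findFrom l ['*', '/'] (↑k) none =
      PySem.Chars.findFrom l ['*', '/'] (↑(k + 1)) none := by
  by_cases hex : ∃ j, k + 1 ≤ j ∧ pvOcc l j = true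
  · have hspec := Nat.find_spec hex
    set j0 := Nat.find hex with hj0
    have hmin1 : ∀ m, k + 1 ≤ m → m < j0 → pvOcc l m = false := by
      intro m h1 h2
      have := Nat.find_min hex h2
      rw [not_and] at this
      have := this h1
      exact Bool.not_eq_true _ ▸ Bool.eq_false_iff.2 (fun he => this he)
    have hlen : k + 1 ≤ l.length := by
      have := pvOcc_len l j0 hspec.2
      omega
    rw [pvFind_eq_of l (k + 1) j0 hlen hspec.1 hspec.2 hmin1,
      pvFind_eq_of l k j0 (by omega) (by omega) hspec.2 ?_]
    intro m h1 h2
    rcases Nat.eq_or_lt_of_le h1 with he | hlt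
    · rw [he] at h; exact h
    · exact hmin1 m hlt h2
  · push Not at hex
    have hall : ∀ m, k ≤ m → pvOcc l m = false := by
      intro m hm
      rcases Nat.eq_or_lt_of_le hm with he | hlt
      · rw [he] at h; exact h
      · exact Bool.eq_false_iff.2 (fun he => by
          have := hex m hlt
          rw [he] at this; exact this rfl)
    rw [pvFind_none_of l k hall, pvFind_none_of l (k + 1) (fun m hm => hall m (by omega))]

theorem pvSkipA_ge (l : List Char) (q : Char) :
    ∀ fuel i, i ≤ pvSkipA l fuel i q := by
  intro fuel
  induction fuel with
  | zero => intro i; rw [pvSkipA]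
  | succ fuel ih =>
    intro i
    rw [pvSkipA]
    by_cases hn : i < l.length
    · rw [if_pos hn]
      by_cases hb : l.getD i ' ' = '\\'
      · rw [if_pos hb]; have := ih (i + 2); omega
      · rw [if_neg hb]
        by_cases hq : l.getD i ' ' = q
        · rw [if_pos hq]
        · rw [if_neg hq]; have := ih (i + 1); omega
    · rw [if_neg hn]

theorem pvSkipA_fuel (l : List Char) (q : Char) :
    ∀ f f' i, l.length - i ≤ f → l.length - i ≤ f' → pvSkipA l f i q = pvSkipA l f' i q := by
  intro f
  induction f with
  | zero =>
    intro f' i h1 h2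
    cases f' with
    | zero => rfl
    | succ f' => rw [pvSkipA, pvSkipA, if_neg (by omega : ¬ i < l.length)]
  | succ f ih =>
    intro f' i h1 h2
    cases f' with
    | zero => rw [pvSkipA, pvSkipA, if_neg (by omega : ¬ i < l.length)]
    | succ f' =>
      rw [pvSkipA, pvSkipA]
      by_cases hn : i < l.length
      · rw [if_pos hn, if_pos hn]
        by_cases hb : l.getD i ' ' = '\\'
        · rw [if_pos hb, if_pos hb]; exact ih f' (i + 2) (by omega) (by omega)
        · rw [if_neg hb, if_neg hb]
          by_cases hq : l.getD i ' ' = q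
          · rw [if_pos hq, if_pos hq]
          · rw [if_neg hq, if_neg hq]; exact ih f' (i + 1) (by omega) (by omega)
      · rw [if_neg hn, if_neg hn]

theorem pvMainA_fuel (l : List Char) :
    ∀ f f' i parts, l.length - i ≤ f → l.length - i ≤ f' →
      pvMainA l f i parts = pvMainA l f' i parts := by
  intro f
  induction f with
  | zero =>
    intro f' i parts h1 h2
    cases f' with
    | zero => rfl
    | succ f' => rw [pvMainA, pvMainA, if_neg (by omega : ¬ i < l.length)]
  | succ f ih =>
    intro f' i parts h1 h2
    cases f' with
    | zero => rw [pvMainA, pvMainA, if_neg (by omega : ¬ i < l.length)]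
    | succ f' =>
      rw [pvMainA, pvMainA]
      by_cases hn : i < l.length
      · rw [if_pos hn, if_pos hn]
        by_cases hc1 : l.getD i ' ' = '/' ∧ i + 1 < l.length ∧ l.getD (i + 1) ' ' = '/'
        · rw [if_pos hc1, if_pos hc1]
        · rw [if_neg hc1, if_neg hc1]
          by_cases hc2 : l.getD i ' ' = '/' ∧ i + 1 < l.length ∧ l.getD (i + 1) ' ' = '*'
          · rw [if_pos hc2, if_pos hc2]
            by_cases hf : PySem.Chars.findFrom l ['*', '/'] (↑(i + 2)) none = -1
            · rw [if_pos hf, if_pos hf]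
            · rw [if_neg hf, if_neg hf]
              have hge := pvFindFrom_ge l ['*', '/'] (i + 2) hf
              exact ih f' _ _ (by omega) (by omega)
          · rw [if_neg hc2, if_neg hc2]
            by_cases hc3 : l.getD i ' ' = '"' ∨ l.getD i ' ' = '\''
            · rw [if_pos hc3, if_pos hc3]
              have := pvSkipA_ge l (l.getD i ' ') l.length (i + 1)
              exact ih f' _ _ (by omega) (by omega)
            · rw [if_neg hc3, if_neg hc3]
              exact ih f' _ _ (by omega) (by omega)
      · rw [if_neg hn, if_neg hn]

theorem pvLoopB_fuel (l : List Char) :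
    ∀ f f' i st parts, l.length - i ≤ f → l.length - i ≤ f' →
      pvLoopB l f i st parts = pvLoopB l f' i st parts := by
  intro f
  induction f with
  | zero =>
    intro f' i st parts h1 h2
    cases f' with
    | zero => rfl
    | succ f' =>
      cases st with
      | normal => rw [pvLoopB, pvLoopB, if_neg (by omega : ¬ i < l.length)] <;> simp
      | instr q => rw [pvLoopB, pvLoopB, if_neg (by omega : ¬ i < l.length)] <;> simp
      | inblock start opened => rw [pvLoopB, pvLoopB, if_neg (by omega : ¬ i < l.length)]
  | succ f ih =>
    intro f' i st parts h1 h2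
    cases f' with
    | zero =>
      cases st with
      | normal => rw [pvLoopB, pvLoopB, if_neg (by omega : ¬ i < l.length)] <;> simp
      | instr q => rw [pvLoopB, pvLoopB, if_neg (by omega : ¬ i < l.length)] <;> simp
      | inblock start opened => rw [pvLoopB, pvLoopB, if_neg (by omega : ¬ i < l.length)]
    | succ f' =>
      by_cases hn : i < l.length
      · cases st with
        | normal =>
          rw [pvLoopB, pvLoopB, if_pos hn, if_pos hn]
          by_cases hc1 : l.getD i ' ' = '/' ∧ i + 1 < l.length ∧ l.getD (i + 1) ' ' = '/'
          · rw [if_pos hc1, if_pos hc1]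
          · rw [if_neg hc1, if_neg hc1]
            by_cases hc2 : l.getD i ' ' = '/' ∧ i + 1 < l.length ∧ l.getD (i + 1) ' ' = '*'
            · rw [if_pos hc2, if_pos hc2]
              exact ih f' _ _ _ (by omega) (by omega)
            · rw [if_neg hc2, if_neg hc2]
              by_cases hc3 : l.getD i ' ' = '"' ∨ l.getD i ' ' = '\''
              · rw [if_pos hc3, if_pos hc3]
                exact ih f' _ _ _ (by omega) (by omega)
              · rw [if_neg hc3, if_neg hc3]
                exact ih f' _ _ _ (by omega) (by omega)
        | instr q =>
          rw [pvLoopB, pvLoopB, if_pos hn, if_pos hn]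
          by_cases hb : l.getD i ' ' = '\\'
          · rw [if_pos hb, if_pos hb]
            exact ih f' _ _ _ (by omega) (by omega)
          · rw [if_neg hb, if_neg hb]
            by_cases hq : l.getD i ' ' = q
            · rw [if_pos hq, if_pos hq]
              exact ih f' _ _ _ (by omega) (by omega)
            · rw [if_neg hq, if_neg hq]
              exact ih f' _ _ _ (by omega) (by omega)
        | inblock start opened =>
          rw [pvLoopB, pvLoopB, if_pos hn, if_pos hn]
          by_cases hc : l.getD i ' ' = '*' ∧ i + 1 < l.length ∧ l.getD (i + 1) ' ' = '/'
          · rw [if_pos hc, if_pos hc]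
            exact ih f' _ _ _ (by omega) (by omega)
          · rw [if_neg hc, if_neg hc]
            exact ih f' _ _ _ (by omega) (by omega)
      · cases st with
        | normal => rw [pvLoopB, pvLoopB, if_neg hn, if_neg hn]
        | instr q => rw [pvLoopB, pvLoopB, if_neg hn, if_neg hn]
        | inblock start opened => rw [pvLoopB, pvLoopB, if_neg hn, if_neg hn]

theorem pvLoopB_block (l : List Char) :
    ∀ fuel i start opened parts, l.length - i ≤ fuel →
    pvLoopB l fuel i (.inblock start opened) parts =
      if PySem.Chars.findFrom l ['*', '/'] (↑i) none = -1 then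
        (some (PySem.Str.join " " (parts ++ [String.ofList (l.drop start)])), true)
      else
        pvLoopB l fuel ((PySem.Chars.findFrom l ['*', '/'] (↑i) none).toNat + 2) .normal
          (parts ++ [String.ofList (List.take
            ((if opened then (PySem.Chars.findFrom l ['*', '/'] (↑i) none).toNat + 2
              else (PySem.Chars.findFrom l ['*', '/'] (↑i) none).toNat) - start) (l.drop start))]) := by
  intro fuel
  induction fuel with
  | zero =>
    intro i start opened parts hfu
    rw [pvFind_none_of l i (fun m hm => pvOcc_false_of_end l m (by omega)), if_pos rfl]
    rw [pvLoopB]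
    simp [PySem.List.slice_from l (Int.natCast_nonneg start)]
  | succ fuel ih =>
    intro i start opened parts hfu
    by_cases hn : i < l.length
    · by_cases hc : l.getD i ' ' = '*' ∧ i + 1 < l.length ∧ l.getD (i + 1) ' ' = '/'
      · have hocc : pvOcc l i = true := by
          simp only [pvOcc, Bool.and_eq_true, beq_iff_eq, decide_eq_true_eq]
          exact ⟨⟨hc.2.1, hc.1⟩, hc.2.2⟩
        conv_lhs => rw [pvLoopB]
        rw [if_pos hn]
        simp only [if_pos hc]
        rw [pvFind_hit l i hocc, if_neg (by omega : ¬ ((i : Int) = -1)), Int.toNat_natCast,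
          PySem.List.slice_natCast]
        exact pvLoopB_fuel l fuel (fuel + 1) (i + 2) .normal _ (by omega) (by omega)
      · have hocc : pvOcc l i = false := by
          simp only [pvOcc, Bool.and_eq_false_iff, decide_eq_false_iff_not, not_lt,
            beq_eq_false_iff_ne]
          by_cases h1 : i + 1 < l.length
          · by_cases h2 : l.getD i ' ' = '*'
            · right; intro hne; exact hc ⟨h2, h1, by tauto⟩
            · left; right; exact h2
          · left; left; omega
        conv_lhs => rw [pvLoopB]
        rw [if_pos hn]
        simp only [if_neg hc]
        rw [ih (i + 1) start opened parts (by omega), pvFind_step l i hocc]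
        by_cases hf : PySem.Chars.findFrom l ['*', '/'] (↑(i + 1)) none = -1
        · rw [if_pos hf, if_pos hf]
        · rw [if_neg hf, if_neg hf]
          have hge := pvFindFrom_ge l ['*', '/'] (i + 1) hf
          exact pvLoopB_fuel l fuel (fuel + 1) _ .normal _ (by omega) (by omega)
    · rw [pvFind_none_of l i (fun m hm => pvOcc_false_of_end l m (by omega)), if_pos rfl]
      rw [pvLoopB, if_neg hn]
      simp [PySem.List.slice_from l (Int.natCast_nonneg start)]

theorem pvMain_eq (l : List Char) :
    ∀ fuel i, l.length - i ≤ fuel →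
    (∀ parts, pvLoopB l fuel i .normal parts = pvMainA l fuel i parts) ∧
    (∀ q parts, pvLoopB l fuel i (.instr q) parts =
      pvMainA l fuel (pvSkipA l fuel i q + 1) parts) := by
  intro fuel
  induction fuel with
  | zero =>
    intro i hfu
    constructor
    · intro parts; rfl
    · intro q parts; rfl
  | succ fuel ih =>
    intro i hfu
    by_cases hn : i < l.length
    · constructor
      · intro parts
        rw [pvLoopB, pvMainA, if_pos hn, if_pos hn]
        by_cases h1 : l.getD i ' ' = '/' ∧ i + 1 < l.length ∧ l.getD (i + 1) ' ' = '/'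
        · simp only [if_pos h1]
        · simp only [if_neg h1]
          by_cases h2 : l.getD i ' ' = '/' ∧ i + 1 < l.length ∧ l.getD (i + 1) ' ' = '*'
          · simp only [if_pos h2]
            rw [pvLoopB_block l fuel (i + 2) i true parts (by omega)]
            by_cases hf : PySem.Chars.findFrom l ['*', '/'] (↑(i + 2)) none = -1
            · rw [if_pos hf, if_pos hf]
              simp [PySem.List.slice_from l (Int.natCast_nonneg i)]
            · rw [if_neg hf, if_neg hf]
              have hge := pvFindFrom_ge l ['*', '/'] (i + 2) hf
              have hcast : PySem.Chars.findFrom l ['*', '/'] (↑(i + 2)) none + 2 =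
                  (((PySem.Chars.findFrom l ['*', '/'] (↑(i + 2)) none).toNat + 2 : Nat) : Int) := by
                omega
              rw [hcast, PySem.List.slice_natCast]
              rw [(ih ((PySem.Chars.findFrom l ['*', '/'] (↑(i + 2)) none).toNat + 2)
                (by omega)).1]
              simp
          · simp only [if_neg h2]
            by_cases h3 : l.getD i ' ' = '"' ∨ l.getD i ' ' = '\''
            · simp only [if_pos h3]
              rw [(ih (i + 1) (by omega)).2 (l.getD i ' ') parts]
              rw [pvSkipA_fuel l (l.getD i ' ') fuel l.length (i + 1) (by omega) (by omega)]
            · simp only [if_neg h3]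
              exact (ih (i + 1) (by omega)).1 parts
      · intro q parts
        rw [pvLoopB, if_pos hn]
        conv_rhs => rw [pvSkipA]
        rw [if_pos hn]
        by_cases h1 : l.getD i ' ' = '\\'
        · simp only [if_pos h1]
          rw [(ih (i + 2) (by omega)).2 q parts]
          have := pvSkipA_ge l q fuel (i + 2)
          exact pvMainA_fuel l fuel (fuel + 1) _ parts (by omega) (by omega)
        · by_cases h2 : l.getD i ' ' = q
          · simp only [if_neg h1, if_pos h2]
            rw [(ih (i + 1) (by omega)).1 parts]
            exact pvMainA_fuel l fuel (fuel + 1) _ parts (by omega) (by omega)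
          · simp only [if_neg h1, if_neg h2]
            rw [(ih (i + 1) (by omega)).2 q parts]
            have := pvSkipA_ge l q fuel (i + 1)
            exact pvMainA_fuel l fuel (fuel + 1) _ parts (by omega) (by omega)
    · constructor
      · intro parts
        rw [pvLoopB, pvMainA, if_neg hn, if_neg hn]
      · intro q parts
        rw [pvLoopB, if_neg hn]
        conv_rhs => rw [pvSkipA]
        rw [if_neg hn, pvMainA, if_neg (by omega : ¬ i + 1 < l.length)]

-- ===== VERDICT (by name: the statement is the Claim_ definition above) =====
theorem get_c_comment_portion_py_spec : Claim_equal_get_c_comment_portion_py := by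
  intro line ib _
  unfold Spec_get_c_comment_portion_py get_c_comment_portion_py get_c_comment_portion_py_alt
  cases ib
  · simp only [Bool.false_eq_true, if_false]
    exact ((pvMain_eq line.toList line.toList.length 0 (by omega)).1 []).symm
  · simp only [if_true]
    rw [pvLoopB_block line.toList line.toList.length 0 0 false [] (by omega)]
    rw [(by rfl : ((0 : Nat) : Int) = 0), PySem.Chars.findFrom_zero]
    by_cases hf : PySem.Chars.find line.toList ['*', '/'] = -1
    · rw [if_pos hf, if_pos hf]
      simp [PySem.Str.join, PySem.Chars.join_singleton, String.ofList_toList]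
    · rw [if_neg hf, if_neg hf]
      have hge : (0 : Int) ≤ PySem.Chars.find line.toList ['*', '/'] := by
        have := pvFindFrom_ge line.toList ['*', '/'] 0
        rw [(by rfl : ((0 : Nat) : Int) = 0), PySem.Chars.findFrom_zero] at this
        exact this hf
      rw [(pvMain_eq line.toList line.toList.length
        ((PySem.Chars.find line.toList ['*', '/']).toNat + 2) (by omega)).1]
      rw [PySem.List.slice_to line.toList hge]
      simp
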